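-- pv_equiv track=rewrite | github.com/Method68/Npuzzle | core_solver.py | loopOnBoardInversion
-- ===== SOURCE A (Python) =====
-- def loopOnBoardInversion(gameboardsimplearray, size):
-- 	i = 0
-- 	inversion = 0
-- 	while(i < size):
-- 		j = i + 1
-- 		while(j < size):
-- 			if(gameboardsimplearray[j] != 0 and gameboardsimplearray[i] != 0):
-- 				if(gameboardsimplearray[j] > gameboardsimplearray[i]):
-- 					inversion += 1
-- 			j += 1
-- 		i += 1
-- 	return inversion
-- ===== SOURCE B (Python) =====
-- def loopOnBoardInversion(gameboardsimplearray, size):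
--     # merge-sort inversion counting over the nonzero cells of the first `size` entries
--     vals = [x for i, x in enumerate(gameboardsimplearray) if i < size and x != 0]
--
--     def msort(lst):
--         n = len(lst)
--         if n <= 1:
--             return lst, 0
--         left, cl = msort(lst[:n // 2])
--         right, cr = msort(lst[n // 2:])
--         merged = []
--         cross = 0
--         i = j = 0
--         while i < len(left) and j < len(right):
--             if left[i] < right[j]:
--                 merged.append(left[i])
--                 i += 1
--             else:
--                 merged.append(right[j])
--                 cross += i
--                 j += 1
--         cross += i * (len(right) - j)
--         merged.extend(left[i:])
--         merged.extend(right[j:])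
--         return merged, cl + cr + cross
--
--     return msort(vals)[1]
-- ===== Notes on version B (the rewrite author's own statement) =====
-- stated objective: faster
-- what changed: Replaces A's O(n^2) nested index loops by a single pass extracting the nonzero cells of the first `size` entries followed by merge-sort inversion counting.
import Mathlib
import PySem

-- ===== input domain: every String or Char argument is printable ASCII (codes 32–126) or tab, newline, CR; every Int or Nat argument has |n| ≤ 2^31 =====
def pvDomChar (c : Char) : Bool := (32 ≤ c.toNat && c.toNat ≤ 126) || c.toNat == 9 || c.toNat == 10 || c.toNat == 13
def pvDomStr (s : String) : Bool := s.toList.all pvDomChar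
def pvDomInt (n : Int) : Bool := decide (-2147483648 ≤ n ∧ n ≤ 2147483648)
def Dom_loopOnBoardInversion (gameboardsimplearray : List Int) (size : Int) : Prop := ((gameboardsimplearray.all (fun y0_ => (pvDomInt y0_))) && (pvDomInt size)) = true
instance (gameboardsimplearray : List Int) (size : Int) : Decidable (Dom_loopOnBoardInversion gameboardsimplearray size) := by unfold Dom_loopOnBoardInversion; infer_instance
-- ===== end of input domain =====

-- B replaces A's O(n^2) nested index loops by merge-sort counting over the nonzero prefix cells (asymptotically faster).

-- ===== PORT A =====
-- arr[k] under Pre_ is always in range; getD 0 is never the value used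
def pvAget (arr : List Int) (k : Int) : Int := (PySem.List.pyGet? arr k).getD 0

def pvAinner (arr : List Int) (size i j inv : Int) : Int :=
  if j < size then
    pvAinner arr size i (j + 1)
      (if pvAget arr j ≠ 0 ∧ pvAget arr i ≠ 0 then
        (if pvAget arr j > pvAget arr i then inv + 1 else inv)
       else inv)
  else inv
termination_by (size - j).toNat
decreasing_by omega

def pvAouter (arr : List Int) (size i inv : Int) : Int :=
  if i < size then pvAouter arr size (i + 1) (pvAinner arr size i (i + 1) inv) else inv
termination_by (size - i).toNat
decreasing_by omega

def loopOnBoardInversion (gameboardsimplearray : List Int) (size : Int) : Int :=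
  pvAouter gameboardsimplearray size 0 0

-- ===== PORT B =====
-- the merge loop of Source B, as structural recursion on the two sorted runs; k is Source B's index i (elements taken from the left run)
def pvMergeCnt : List Int → List Int → Int → List Int × Int
  | [], b, k => (b, k * (b.length : Int))
  | x :: a, [], _k => (x :: a, 0)
  | x :: a, y :: b, k =>
    if x < y then
      let r := pvMergeCnt a (y :: b) (k + 1)
      (x :: r.1, r.2)
    else
      let r := pvMergeCnt (x :: a) b k
      (y :: r.1, r.2 + k)

def pvMsortCnt (l : List Int) : List Int × Int :=
  if l.length ≤ 1 then (l, 0)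
  else
    let r1 := pvMsortCnt (l.take (l.length / 2))
    let r2 := pvMsortCnt (l.drop (l.length / 2))
    let m := pvMergeCnt r1.1 r2.1 0
    (m.1, r1.2 + r2.2 + m.2)
termination_by l.length
decreasing_by
  · simp; omega
  · simp; omega

def loopOnBoardInversion_alt (gameboardsimplearray : List Int) (size : Int) : Int :=
  let vals := ((PySem.List.enumerate gameboardsimplearray 0).filter
      (fun p => decide (p.1 < size) && decide (p.2 ≠ 0))).map (·.2)
  (pvMsortCnt vals).2

-- ===== PRECONDITION & SPEC =====
-- A raises IndexError exactly when size ≥ 2 and size > len(arr) (then index j = len(arr) is read); otherwise it returns.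
def Pre_loopOnBoardInversion (gameboardsimplearray : List Int) (size : Int) : Prop :=
  size ≤ (gameboardsimplearray.length : Int) ∨ size ≤ 1
instance (gameboardsimplearray : List Int) (size : Int) : Decidable (Pre_loopOnBoardInversion gameboardsimplearray size) := by unfold Pre_loopOnBoardInversion; infer_instance

def pvWitness_loopOnBoardInversion : List Int × Int := ([2, 1, 3, 0], 4)

def Spec_loopOnBoardInversion (gameboardsimplearray : List Int) (size : Int) (out : Int) : Prop := out = loopOnBoardInversion_alt gameboardsimplearray size
instance (gameboardsimplearray : List Int) (size : Int) (out : Int) : Decidable (Spec_loopOnBoardInversion gameboardsimplearray size out) := by unfold Spec_loopOnBoardInversion; infer_instance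

-- ===== CLAIM (what is proved, stated in full; the proofs are below) =====
def Claim_equal_loopOnBoardInversion : Prop := ∀ (gameboardsimplearray : List Int) (size : Int), Dom_loopOnBoardInversion gameboardsimplearray size → Pre_loopOnBoardInversion gameboardsimplearray size → Spec_loopOnBoardInversion gameboardsimplearray size (loopOnBoardInversion gameboardsimplearray size)

-- ===== LEMMAS AND PROOFS =====

-- number of pairs i < j with l[j] > l[i]
def pvF : List Int → Int
  | [] => 0
  | x :: xs => (xs.countP (fun y => decide (x < y)) : Int) + pvF xs

-- A's pair count: both entries nonzero and the later one larger
def pvFA : List Int → Int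
  | [] => 0
  | x :: xs => (xs.countP (fun y => decide (y ≠ 0 ∧ x ≠ 0 ∧ x < y)) : Int) + pvFA xs

-- number of pairs (x ∈ a, y ∈ b) with x < y
def pvCross (a b : List Int) : Int :=
  (b.map (fun y => (a.countP (fun x => decide (x < y)) : Int))).sum

theorem pvCross_nil_left (b : List Int) : pvCross [] b = 0 := by
  simp [pvCross]

theorem pvCross_cons_left (x : Int) (a b : List Int) :
    pvCross (x :: a) b = pvCross a b + (b.countP (fun y => decide (x < y)) : Int) := by
  induction b with
  | nil => simp [pvCross]
  | cons y b ih =>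
    simp only [pvCross, List.map_cons, List.sum_cons, List.countP_cons] at ih ⊢
    by_cases h : x < y <;> simp [h] at ih ⊢ <;> omega

theorem pvCross_cons_right (a : List Int) (y : Int) (b : List Int) :
    pvCross a (y :: b) = (a.countP (fun x => decide (x < y)) : Int) + pvCross a b := by
  simp [pvCross]

theorem pvF_append (l1 l2 : List Int) :
    pvF (l1 ++ l2) = pvF l1 + pvF l2 + pvCross l1 l2 := by
  induction l1 with
  | nil => simp [pvF, pvCross_nil_left]
  | cons x l1 ih =>
    simp only [List.cons_append, pvF, List.countP_append, ih, pvCross_cons_left]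
    push_cast
    ring

theorem pvCross_perm {a a' b b' : List Int} (ha : a.Perm a') (hb : b.Perm b') :
    pvCross a b = pvCross a' b' := by
  have h1 : pvCross a b = pvCross a' b := by
    unfold pvCross
    congr 1
    exact List.map_congr_left (fun y _ => by rw [ha.countP_eq])
  rw [h1]
  unfold pvCross
  exact (hb.map _).sum_eq

theorem pvMergeCnt_spec (a b : List Int) (k : Int)
    (ha : a.Pairwise (· ≤ ·)) (hb : b.Pairwise (· ≤ ·)) :
    (pvMergeCnt a b k).1.Perm (a ++ b) ∧ (pvMergeCnt a b k).1.Pairwise (· ≤ ·) ∧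
      (pvMergeCnt a b k).2 = pvCross a b + k * (b.length : Int) := by
  match a, b with
  | [], b =>
    simpa [pvMergeCnt, pvCross_nil_left] using hb
  | x :: a, [] =>
    simpa [pvMergeCnt, pvCross] using ha
  | x :: a, y :: b =>
    by_cases hxy : x < y
    · have ih := pvMergeCnt_spec a (y :: b) (k + 1) (List.pairwise_cons.mp ha).2 hb
      obtain ⟨ihp, ihs, ihc⟩ := ih
      simp only [pvMergeCnt, if_pos hxy]
      refine ⟨ihp.cons x, ?_, ?_⟩
      · refine List.pairwise_cons.mpr ⟨?_, ihs⟩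
        intro z hz
        have hz' : z ∈ a ++ y :: b := ihp.mem_iff.mp hz
        rcases List.mem_append.mp hz' with h | h
        · exact (List.pairwise_cons.mp ha).1 z h
        · rcases List.mem_cons.mp h with h | h
          · exact le_of_lt (h ▸ hxy)
          · exact le_of_lt (lt_of_lt_of_le hxy ((List.pairwise_cons.mp hb).1 z h))
      · have hcnt : (y :: b).countP (fun z => decide (x < z)) = (y :: b).length := by
          refine List.countP_eq_length.mpr ?_
          intro z hz
          rcases List.mem_cons.mp hz with h | h
          · simpa [h] using hxy
          · simpa using lt_of_lt_of_le hxy ((List.pairwise_cons.mp hb).1 z h)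
        rw [ihc, pvCross_cons_left, hcnt]
        push_cast [List.length_cons]
        ring
    · have ih := pvMergeCnt_spec (x :: a) b k ha (List.pairwise_cons.mp hb).2
      obtain ⟨ihp, ihs, ihc⟩ := ih
      simp only [pvMergeCnt, if_neg hxy]
      have hyx : y ≤ x := le_of_not_gt hxy
      refine ⟨(ihp.cons y).trans List.perm_middle.symm, ?_, ?_⟩
      · refine List.pairwise_cons.mpr ⟨?_, ihs⟩
        intro z hz
        have hz' : z ∈ (x :: a) ++ b := ihp.mem_iff.mp hz
        rcases List.mem_append.mp hz' with h | h
        · rcases List.mem_cons.mp h with h | h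
          · exact h ▸ hyx
          · exact le_trans hyx ((List.pairwise_cons.mp ha).1 z h)
        · exact (List.pairwise_cons.mp hb).1 z h
      · have hcnt : (x :: a).countP (fun z => decide (z < y)) = 0 := by
          refine List.countP_eq_zero.mpr ?_
          intro z hz
          rcases List.mem_cons.mp hz with h | h
          · simpa [h] using hxy
          · simpa using not_lt.mpr (le_trans hyx ((List.pairwise_cons.mp ha).1 z h))
        rw [ihc, pvCross_cons_right, hcnt]
        push_cast [List.length_cons]
        ring
termination_by a.length + b.length

theorem pvMsortCnt_spec (l : List Int) :
    (pvMsortCnt l).1.Perm l ∧ (pvMsortCnt l).1.Pairwise (· ≤ ·) ∧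
      (pvMsortCnt l).2 = pvF l := by
  by_cases h : l.length ≤ 1
  · match l with
    | [] => simp [pvMsortCnt, pvF]
    | [x] => simp [pvMsortCnt, pvF]
    | x :: y :: t => simp at h
  · have ⟨p1, s1, c1⟩ := pvMsortCnt_spec (l.take (l.length / 2))
    have ⟨p2, s2, c2⟩ := pvMsortCnt_spec (l.drop (l.length / 2))
    have ⟨pm, sm, cm⟩ := pvMergeCnt_spec (pvMsortCnt (l.take (l.length / 2))).1
      (pvMsortCnt (l.drop (l.length / 2))).1 0 s1 s2
    have hunf : pvMsortCnt l =
        ((pvMergeCnt (pvMsortCnt (l.take (l.length / 2))).1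
            (pvMsortCnt (l.drop (l.length / 2))).1 0).1,
          (pvMsortCnt (l.take (l.length / 2))).2 + (pvMsortCnt (l.drop (l.length / 2))).2 +
            (pvMergeCnt (pvMsortCnt (l.take (l.length / 2))).1
              (pvMsortCnt (l.drop (l.length / 2))).1 0).2) := by
      rw [pvMsortCnt]
      simp [h]
    rw [hunf]
    have htd : l.take (l.length / 2) ++ l.drop (l.length / 2) = l := List.take_append_drop _ l
    refine ⟨pm.trans ((p1.append p2).trans (by rw [htd])), sm, ?_⟩
    rw [cm, c1, c2, pvCross_perm p1 p2]
    have hF := pvF_append (l.take (l.length / 2)) (l.drop (l.length / 2))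
    rw [htd] at hF
    rw [hF]
    ring
termination_by l.length
decreasing_by
  · simp; omega
  · simp; omega

theorem pvFA_filter (l : List Int) :
    pvFA l = pvF (l.filter (fun x => decide (x ≠ 0))) := by
  induction l with
  | nil => simp [pvFA, pvF]
  | cons x xs ih =>
    by_cases hx : x = 0
    · have hc : xs.countP (fun y => decide (y ≠ 0 ∧ x ≠ 0 ∧ x < y)) = 0 :=
        List.countP_eq_zero.mpr (by intro y _; simp [hx])
      simp [pvFA, hx, ih]
    · simp [pvFA, pvF, hx, List.countP_filter, ih]
      exact List.countP_congr (fun y _ => by rw [Bool.and_comm])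

theorem pvAinner_spec (arr : List Int) (size i j inv : Int)
    (hj : 0 ≤ j) (hlen : size ≤ (arr.length : Int)) :
    pvAinner arr size i j inv =
      inv + (((arr.take size.toNat).drop j.toNat).countP
        (fun y => decide (y ≠ 0 ∧ pvAget arr i ≠ 0 ∧ pvAget arr i < y)) : Int) := by
  by_cases hjs : j < size
  · have hjl : j.toNat < arr.length := by omega
    have hjt : j.toNat < (arr.take size.toNat).length := by simp; omega
    have hseg : (arr.take size.toNat).drop j.toNat =
        arr[j.toNat] :: (arr.take size.toNat).drop ((j + 1).toNat) := by
      have h1 : (j + 1).toNat = j.toNat + 1 := by omega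
      rw [List.drop_eq_getElem_cons hjt, List.getElem_take, h1]
    have hg : pvAget arr j = arr[j.toNat] := by
      unfold pvAget
      rw [PySem.List.pyGet?_eq_some_getElem arr hj (by omega)]
      rfl
    rw [pvAinner]
    simp only [if_pos hjs]
    rw [pvAinner_spec arr size i (j + 1) _ (by omega) hlen]
    rw [hseg, List.countP_cons, hg]
    by_cases h1 : arr[j.toNat] ≠ 0 ∧ pvAget arr i ≠ 0
    · by_cases h2 : pvAget arr i < arr[j.toNat] <;> simp [h1, h2]
      omega
    · have h2 : ¬ (arr[j.toNat] ≠ 0 ∧ pvAget arr i ≠ 0 ∧ pvAget arr i < arr[j.toNat]) := by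
        tauto
      simp [h1, h2]
  · have hnil : (arr.take size.toNat).drop j.toNat = [] :=
      List.drop_eq_nil_of_le (by simp; omega)
    rw [pvAinner]
    simp [hjs, hnil]
termination_by (size - j).toNat
decreasing_by omega

theorem pvAouter_spec (arr : List Int) (size i inv : Int)
    (hi : 0 ≤ i) (hlen : size ≤ (arr.length : Int)) :
    pvAouter arr size i inv = inv + pvFA ((arr.take size.toNat).drop i.toNat) := by
  by_cases his : i < size
  · have hil : i.toNat < arr.length := by omega
    have hit : i.toNat < (arr.take size.toNat).length := by simp; omega
    have hseg : (arr.take size.toNat).drop i.toNat =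
        arr[i.toNat] :: (arr.take size.toNat).drop ((i + 1).toNat) := by
      have h1 : (i + 1).toNat = i.toNat + 1 := by omega
      rw [List.drop_eq_getElem_cons hit, List.getElem_take, h1]
    have hg : pvAget arr i = arr[i.toNat] := by
      unfold pvAget
      rw [PySem.List.pyGet?_eq_some_getElem arr hi (by omega)]
      rfl
    rw [pvAouter]
    simp only [if_pos his]
    rw [pvAouter_spec arr size (i + 1) _ (by omega) hlen]
    rw [pvAinner_spec arr size i (i + 1) inv (by omega) hlen]
    rw [hseg, pvFA, hg]
    ring
  · have hnil : (arr.take size.toNat).drop i.toNat = [] :=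
      List.drop_eq_nil_of_le (by simp; omega)
    rw [pvAouter]
    simp [his, hnil, pvFA]
termination_by (size - i).toNat
decreasing_by omega

theorem pvVals (xs : List Int) (size s : Int) :
    ((PySem.List.enumerate xs s).filter
        (fun p => decide (p.1 < size) && decide (p.2 ≠ 0))).map (·.2) =
      (xs.take (size - s).toNat).filter (fun x => decide (x ≠ 0)) := by
  induction xs generalizing s with
  | nil => simp [PySem.List.enumerate_nil]
  | cons x xs ih =>
    rw [PySem.List.enumerate_cons]
    by_cases hs : s < size
    · have ht : (size - s).toNat = (size - (s + 1)).toNat + 1 := by omega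
      rw [ht]
      by_cases hx : x = 0 <;> simp [hs, hx] <;> simpa using ih (s + 1)
    · have ht : (size - s).toNat = 0 := by omega
      have ht1 : (size - (s + 1)).toNat = 0 := by omega
      simp [hs, ht]
      simpa [ht1] using ih (s + 1)

-- ===== VERDICT (by name: the statement is the Claim_ definition above) =====
theorem loopOnBoardInversion_spec : Claim_equal_loopOnBoardInversion := by
  intro arr size _ hpre
  unfold Spec_loopOnBoardInversion loopOnBoardInversion loopOnBoardInversion_alt
  have hvals := pvVals arr size 0
  simp only [Int.sub_zero] at hvals
  by_cases hle : size ≤ (arr.length : Int)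
  · have hA := pvAouter_spec arr size 0 0 le_rfl hle
    have hB := (pvMsortCnt_spec (((PySem.List.enumerate arr 0).filter
        (fun p => decide (p.1 < size) && decide (p.2 ≠ 0))).map (·.2))).2.2
    rw [hvals] at hB
    simp only [hA, hvals, hB]
    simp [pvFA_filter]
  · have hsz : size = 1 := by
      rcases hpre with h | h
      · exact absurd h hle
      · have : (0:Int) ≤ (arr.length : Int) := by positivity
        omega
    have harr : arr = [] := by
      have : (arr.length : Int) < 1 := by omega
      have : arr.length = 0 := by omega
      simpa using this
    subst hsz harr
    have h1 : pvAinner [] 1 0 1 0 = 0 := by rw [pvAinner]; norm_num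
    have h2 : pvAouter [] 1 1 0 = 0 := by rw [pvAouter]; norm_num
    have h3 : pvAouter [] 1 0 0 = 0 := by rw [pvAouter]; simp [h1, h2]
    have h4 : pvMsortCnt [] = ([], 0) := by rw [pvMsortCnt]; norm_num
    simp [h3, h4, PySem.List.enumerate_nil]
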